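-- pv_equiv track=rewrite | github.com/vishnu2kmohan/mcp-server-langgraph | scripts/validate_docker_image_contents.py | validate_required_directories
-- ===== SOURCE A (Python) =====
-- from typing import Dict, List, Optional
--
-- def validate_required_directories(copy_commands: List[str]) -> Optional[str]:
--     """
--     Validate required directories are copied.
--
--     Required:
--     - src/ directory (application source code)
--     - tests/ directory (test suite)
--     - pyproject.toml (Python project configuration)
--
--     Returns:
--         Error message if validation fails, None if passes
--     """
--     required_items = {
--         "src/": False,
--         "tests/": False,
--         "pyproject.toml": False,
--     }
--
--     for cmd in copy_commands:
--         for item in required_items.keys():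
--             if item in cmd:
--                 required_items[item] = True
--
--     missing_items = [item for item, found in required_items.items() if not found]
--
--     if missing_items:
--         return f"Required items not found in COPY commands: {', '.join(missing_items)}"
--
--     return None  # Success
-- ===== SOURCE B (Python) =====
-- from typing import List, Optional
--
-- def validate_required_directories(copy_commands: List[str]) -> Optional[str]:
--     # Flatten all COPY commands into one newline-joined document; since no
--     # required item contains a newline, a single substring test per item on
--     # the joined text is equivalent to scanning every command.
--     text = "\n".join(copy_commands)
--     missing = [item for item in ("src/", "tests/", "pyproject.toml") if item not in text]
--     if missing:
--         return f"Required items not found in COPY commands: {', '.join(missing)}"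
--     return None
-- ===== Notes on version B (the rewrite author's own statement) =====
-- stated objective: simpler
-- what changed: B joins all commands into one newline-separated document and does a single substring test per required item on that text (correct because no required item contains a newline), replacing A's per-command/per-item double loop over a mutable found-flag dict.
import Mathlib
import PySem

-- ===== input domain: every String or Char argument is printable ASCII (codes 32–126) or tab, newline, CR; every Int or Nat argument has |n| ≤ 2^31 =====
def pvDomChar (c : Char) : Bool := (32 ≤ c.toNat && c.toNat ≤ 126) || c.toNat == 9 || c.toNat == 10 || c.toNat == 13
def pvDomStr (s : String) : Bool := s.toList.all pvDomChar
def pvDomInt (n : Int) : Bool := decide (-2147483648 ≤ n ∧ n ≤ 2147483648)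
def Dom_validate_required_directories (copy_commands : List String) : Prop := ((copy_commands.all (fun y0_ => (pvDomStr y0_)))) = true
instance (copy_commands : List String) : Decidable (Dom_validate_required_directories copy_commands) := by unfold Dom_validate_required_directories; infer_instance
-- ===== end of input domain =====

-- B joins all commands into one newline-separated document and does one substring test per
-- required item on it, replacing A's double loop over a mutable found-flag dict; objective: simpler.

-- ===== PORT A =====
def validate_required_directories (copy_commands : List String) : Option String :=
  let required_items : PySem.Dict String Bool :=
    PySem.Dict.ofList [("src/", false), ("tests/", false), ("pyproject.toml", false)]
  let required_items :=
    copy_commands.foldl (fun d cmd =>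
      d.keys.foldl (fun d item =>
        if PySem.Str.isIn item cmd then d.insert item true else d) d) required_items
  let missing_items :=
    (required_items.items.filter (fun p => !p.2)).map Prod.fst
  if missing_items ≠ [] then
    some (PySem.Str.join "" ["Required items not found in COPY commands: ",
      PySem.Str.join ", " missing_items])
  else
    none

-- ===== PORT B =====
def validate_required_directories_alt (copy_commands : List String) : Option String :=
  let text := PySem.Str.join "\n" copy_commands
  let missing :=
    ["src/", "tests/", "pyproject.toml"].filter (fun item => !(PySem.Str.isIn item text))
  if missing ≠ [] then
    some (PySem.Str.join "" ["Required items not found in COPY commands: ",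
      PySem.Str.join ", " missing])
  else
    none

-- ===== PRECONDITION & SPEC =====
def Spec_validate_required_directories (copy_commands : List String) (out : Option String) : Prop := out = validate_required_directories_alt copy_commands
instance (copy_commands : List String) (out : Option String) : Decidable (Spec_validate_required_directories copy_commands out) := by unfold Spec_validate_required_directories; infer_instance

-- ===== CLAIM (what is proved, stated in full; the proofs are below) =====
def Claim_equal_validate_required_directories : Prop := ∀ (copy_commands : List String), Dom_validate_required_directories copy_commands → Spec_validate_required_directories copy_commands (validate_required_directories copy_commands)

-- ===== LEMMAS AND PROOFS =====

-- A needle not containing the separator char is a prefix of c ++ sep :: b iff it is a prefix of c.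
lemma prefix_sep (sep : Char) (L c b : List Char) (hsep : sep ∉ L) :
    L <+: c ++ sep :: b ↔ L <+: c := by
  induction c generalizing L with
  | nil =>
    cases L with
    | nil => simp
    | cons y L' =>
      simp only [List.nil_append, List.cons_prefix_cons]
      constructor
      · rintro ⟨rfl, -⟩; exact absurd (List.mem_cons_self) hsep
      · intro h; exact absurd h (by simp)
  | cons z c' ih =>
    cases L with
    | nil => simp
    | cons y L' =>
      simp only [List.cons_append, List.cons_prefix_cons]
      have : sep ∉ L' := fun h => hsep (List.mem_cons_of_mem _ h)
      rw [ih L' this]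

-- A nonempty needle not containing the separator is an infix of c ++ sep :: b
-- iff it is an infix of c or of b (it cannot straddle the separator).
lemma infix_sep (sep : Char) (L c b : List Char) (hne : L ≠ []) (hsep : sep ∉ L) :
    L <:+: c ++ sep :: b ↔ L <:+: c ∨ L <:+: b := by
  induction c with
  | nil =>
    simp only [List.nil_append, List.infix_cons_iff]
    constructor
    · rintro (hp | hi)
      · cases L with
        | nil => exact absurd rfl hne
        | cons y L' =>
          rw [List.cons_prefix_cons] at hp
          exact absurd (hp.1 ▸ List.mem_cons_self) hsep
      · exact Or.inr hi
    · rintro (hc | hb)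
      · rw [List.infix_nil] at hc; exact absurd hc hne
      · exact Or.inr hb
  | cons z c' ih =>
    simp only [List.cons_append, List.infix_cons_iff] at *
    rw [show z :: (c' ++ sep :: b) = (z :: c') ++ sep :: b from rfl,
        prefix_sep sep L (z :: c') b hsep, ih]
    tauto

-- One substring test on the newline-joined document equals a scan over the commands,
-- for a nonempty needle containing no newline.
lemma isIn_joined (item : String) (hne : item.toList ≠ []) (hsep : '\n' ∉ item.toList)
    (cmds : List String) :
    PySem.Str.isIn item (PySem.Str.join "\n" cmds)
      = cmds.any (fun cmd => PySem.Str.isIn item cmd) := by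
  rw [Bool.eq_iff_iff, PySem.Str.isIn_iff_infix, PySem.Str.toList_join, List.any_eq_true]
  show item.toList <:+: List.intercalate "\n".toList (cmds.map String.toList) ↔ _
  induction cmds with
  | nil =>
    simp only [List.map_nil, List.intercalate, List.intersperse, List.flatten_nil,
      List.infix_nil]
    simp [hne]
  | cons c rest ih =>
    cases rest with
    | nil =>
      simp only [List.map_cons, List.map_nil]
      rw [show List.intercalate "\n".toList [c.toList] = c.toList from by
        simp [List.intercalate]]
      simp [PySem.Chars.isIn_iff_infix]
    | cons c' rest' =>
      rw [List.map_cons,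
        show List.intercalate "\n".toList (c.toList :: (c' :: rest').map String.toList)
          = c.toList ++ '\n' :: List.intercalate "\n".toList ((c' :: rest').map String.toList)
          from by simp [List.intercalate],
        infix_sep '\n' item.toList _ _ hne hsep, ih]
      constructor
      · rintro (h | ⟨x, hx, h⟩)
        · exact ⟨c, by simp, (PySem.Str.isIn_iff_infix _ _).2 h⟩
        · exact ⟨x, List.mem_cons_of_mem _ hx, h⟩
      · rintro ⟨x, hx, h⟩
        rcases List.mem_cons.1 hx with rfl | hx
        · exact Or.inl ((PySem.Str.isIn_iff_infix _ _).1 h)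
        · exact Or.inr ⟨x, hx, h⟩

-- A's command loop, starting from the literal three-key dict, yields the literal dict whose
-- flags are the initial flags OR-ed with "some command contains the item".
lemma loop_flags (cmds : List String) (a b c : Bool) :
    cmds.foldl (fun d cmd =>
        (PySem.Dict.keys d).foldl (fun d item =>
          if PySem.Str.isIn item cmd then d.insert item true else d) d)
      (PySem.Dict.mk [("src/", a), ("tests/", b), ("pyproject.toml", c)])
    = PySem.Dict.mk
        [("src/", a || cmds.any (fun cmd => PySem.Str.isIn "src/" cmd)),
         ("tests/", b || cmds.any (fun cmd => PySem.Str.isIn "tests/" cmd)),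
         ("pyproject.toml", c || cmds.any (fun cmd => PySem.Str.isIn "pyproject.toml" cmd))] := by
  induction cmds generalizing a b c with
  | nil => simp
  | cons cmd rest ih =>
    have step :
        (PySem.Dict.keys (PySem.Dict.mk [("src/", a), ("tests/", b), ("pyproject.toml", c)])).foldl
          (fun d item => if PySem.Str.isIn item cmd then d.insert item true else d)
          (PySem.Dict.mk [("src/", a), ("tests/", b), ("pyproject.toml", c)])
        = PySem.Dict.mk
            [("src/", a || PySem.Str.isIn "src/" cmd),
             ("tests/", b || PySem.Str.isIn "tests/" cmd),
             ("pyproject.toml", c || PySem.Str.isIn "pyproject.toml" cmd)] := by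
      cases h1 : PySem.Str.isIn "src/" cmd <;>
      cases h2 : PySem.Str.isIn "tests/" cmd <;>
      cases h3 : PySem.Str.isIn "pyproject.toml" cmd <;>
      cases a <;> cases b <;> cases c <;>
        (simp only [PySem.Str.isIn_eq,
           show "src/".toList = ['s','r','c','/'] from rfl,
           show "tests/".toList = ['t','e','s','t','s','/'] from rfl,
           show "pyproject.toml".toList = ['p','y','p','r','o','j','e','c','t','.','t','o','m','l'] from rfl]
           at h1 h2 h3;
         simp [PySem.Dict.keys, PySem.Dict.insert, PySem.Dict.contains, h1, h2, h3])
    rw [List.foldl_cons, step, ih]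
    simp [Bool.or_assoc]

-- ===== VERDICT (by name: the statement is the Claim_ definition above) =====
theorem validate_required_directories_spec : Claim_equal_validate_required_directories := by
  intro cmds _
  unfold Spec_validate_required_directories validate_required_directories validate_required_directories_alt
  dsimp only
  rw [show PySem.Dict.ofList [("src/", false), ("tests/", false), ("pyproject.toml", false)]
      = PySem.Dict.mk [("src/", false), ("tests/", false), ("pyproject.toml", false)] from by decide,
    loop_flags]
  simp only [List.filter,
    isIn_joined "src/" (by decide) (by decide) cmds,
    isIn_joined "tests/" (by decide) (by decide) cmds,
    isIn_joined "pyproject.toml" (by decide) (by decide) cmds]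
  cases h1 : cmds.any (fun cmd => PySem.Str.isIn "src/" cmd) <;>
  cases h2 : cmds.any (fun cmd => PySem.Str.isIn "tests/" cmd) <;>
  cases h3 : cmds.any (fun cmd => PySem.Str.isIn "pyproject.toml" cmd) <;>
    (simp only [Bool.false_or]; decide)
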